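-- pv_equiv track=rewrite | github.com/jagdish-git/Interview-Programs | 44.py | find_reverse_name
-- ===== SOURCE A (Python) =====
-- def find_reverse_name(string):
--     result = ''
--     result_num = ''
--     total_str = ''
--     for i in string:
--         if i.isalpha():
--             result += i
--         # elif i.isnumeric():
--         #     result_num += i
--         else:
--             if result:
--                 total_str += result[::-1]
--                 result = ""
--             # if result_num:
--             #     total_str += result_num[::-1]
--             #     result_num = ""
--             total_str += i
--     if result:
--         total_str += result[::-1]
--     # if result_num:
--     #     total_str += result_num[::-1]
--
--     return total_str
-- ===== SOURCE B (Python) =====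
-- def find_reverse_name(string):
--     out = []
--     i = 0
--     n = len(string)
--     while i < n:
--         if string[i].isalpha():
--             j = i
--             while j < n and string[j].isalpha():
--                 j += 1
--             out.append(string[i:j][::-1])
--             i = j
--         else:
--             out.append(string[i])
--             i += 1
--     return ''.join(out)
-- ===== Notes on version B (the rewrite author's own statement) =====
-- stated objective: alternative
-- what changed: B scans maximal alphabetic runs with an index/two-pointer loop and reverses each run slice at once, instead of A's char-by-char fold carrying a pending-word accumulator and flushing it on each non-letter and at the end.
import Mathlib
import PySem

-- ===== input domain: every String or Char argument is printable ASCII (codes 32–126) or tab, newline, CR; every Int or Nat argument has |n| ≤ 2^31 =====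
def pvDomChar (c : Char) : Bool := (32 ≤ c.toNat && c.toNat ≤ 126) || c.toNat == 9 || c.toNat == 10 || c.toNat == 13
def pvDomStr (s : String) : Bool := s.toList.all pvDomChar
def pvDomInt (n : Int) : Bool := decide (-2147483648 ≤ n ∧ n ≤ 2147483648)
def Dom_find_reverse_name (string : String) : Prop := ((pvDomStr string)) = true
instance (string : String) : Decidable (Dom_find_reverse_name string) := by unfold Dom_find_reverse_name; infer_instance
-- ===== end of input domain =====

-- B replaces A's char-by-char fold with a pending-word accumulator by a run-scanning
-- two-pointer loop that reverses each maximal alphabetic run slice at once (objective: alternative).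

-- ===== PORT A =====
-- A's loop: state (result, total_str), flush reversed result on each non-letter and at the end
def pvStepA (st : List Char × List Char) (i : Char) : List Char × List Char :=
  if PySem.Chars.isalpha i then (st.1 ++ [i], st.2)
  else
    let total := if st.1 ≠ [] then st.2 ++ st.1.reverse else st.2
    ([], total ++ [i])

def find_reverse_name (string : String) : String :=
  let st := string.toList.foldl pvStepA ([], [])
  String.mk (if st.1 ≠ [] then st.2 ++ st.1.reverse else st.2)

-- ===== PORT B =====
-- B's outer while loop: at a letter, scan the whole run (span) and emit it reversed; else copy the char
def pvGoB : List Char → List Char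
  | [] => []
  | c :: rest =>
    if PySem.Chars.isalpha c then
      ((c :: rest).takeWhile PySem.Chars.isalpha).reverse
        ++ pvGoB ((c :: rest).dropWhile PySem.Chars.isalpha)
    else c :: pvGoB rest
termination_by l => l.length
decreasing_by
  · simp only [List.dropWhile_cons, *, if_pos]
    have := List.length_dropWhile_le (p := PySem.Chars.isalpha) rest
    simp only [List.length_cons]; omega
  · simp

def find_reverse_name_alt (string : String) : String :=
  String.mk (pvGoB string.toList)

-- ===== PRECONDITION & SPEC =====
def Spec_find_reverse_name (string : String) (out : String) : Prop := out = find_reverse_name_alt string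
instance (string : String) (out : String) : Decidable (Spec_find_reverse_name string out) := by unfold Spec_find_reverse_name; infer_instance

-- ===== CLAIM (what is proved, stated in full; the proofs are below) =====
def Claim_equal_find_reverse_name : Prop := ∀ (string : String), Dom_find_reverse_name string → Spec_find_reverse_name string (find_reverse_name string)

-- ===== LEMMAS AND PROOFS =====

-- B's recursion restated through takeWhile/dropWhile at any list
theorem pvGoB_span (l : List Char) :
    pvGoB l = (l.takeWhile PySem.Chars.isalpha).reverse
      ++ pvGoB (l.dropWhile PySem.Chars.isalpha) := by
  cases l with
  | nil => simp [pvGoB]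
  | cons c rest =>
    by_cases h : PySem.Chars.isalpha c
    · rw [pvGoB]; simp [h]
    · simp [h]

-- invariant of A's fold: the flushed result equals total ++ pending-run reversed ++ B's output
theorem pvFoldA_inv (l result total : List Char) :
    (let st := l.foldl pvStepA (result, total)
     if st.1 ≠ [] then st.2 ++ st.1.reverse else st.2)
    = total ++ (l.takeWhile PySem.Chars.isalpha).reverse ++ result.reverse
      ++ pvGoB (l.dropWhile PySem.Chars.isalpha) := by
  induction l generalizing result total with
  | nil => cases result <;> simp [pvGoB]
  | cons c rest ih =>
    by_cases h : PySem.Chars.isalpha c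
    · simp only [List.foldl_cons, pvStepA, h, if_pos, List.takeWhile_cons, List.dropWhile_cons]
      rw [ih]
      simp
    · simp only [List.foldl_cons, pvStepA, h, if_false, Bool.false_eq_true,
        List.takeWhile_cons, List.dropWhile_cons]
      rw [ih, pvGoB]
      simp only [h, Bool.false_eq_true, if_false]
      cases result <;> simp [pvGoB_span (l := rest), List.append_assoc]

-- ===== VERDICT (by name: the statement is the Claim_ definition above) =====
theorem find_reverse_name_spec : Claim_equal_find_reverse_name := by
  intro s _
  show find_reverse_name s = find_reverse_name_alt s
  have h := pvFoldA_inv s.toList [] []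
  simp only at h
  unfold find_reverse_name find_reverse_name_alt
  change String.mk (if (List.foldl pvStepA ([], []) s.toList).1 ≠ [] then (List.foldl pvStepA ([], []) s.toList).2 ++ (List.foldl pvStepA ([], []) s.toList).1.reverse else (List.foldl pvStepA ([], []) s.toList).2) = String.mk (pvGoB s.toList)
  rw [h, pvGoB_span (l := s.toList)]
  simp
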